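-- pv_equiv track=rewrite | github.com/unixliang/serena | src/serena/symbol.py | _count_leading_newlines
-- ===== SOURCE A (Python) =====
-- from collections.abc import Iterable, Iterator, Reversible, Sequence
--
-- def _count_leading_newlines(text: Iterable) -> int:
--     cnt = 0
--     for c in text:
--         if c == "\n":
--             cnt += 1
--         elif c == "\r":
--             continue
--         else:
--             break
--     return cnt
-- ===== SOURCE B (Python) =====
-- def _count_leading_newlines(text) -> int:
--     stripped = text.replace("\r", "")
--     return len(stripped) - len(stripped.lstrip("\n"))
-- ===== Notes on version B (the rewrite author's own statement) =====
-- stated objective: alternative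
-- what changed: Replaces the accumulate-and-break character loop with whole-string string methods: delete every '\r' with replace, then obtain the leading-'\n' run length as len(stripped) - len(stripped.lstrip('\n')) - no explicit scan, no counter, no early exit.
import Mathlib
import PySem

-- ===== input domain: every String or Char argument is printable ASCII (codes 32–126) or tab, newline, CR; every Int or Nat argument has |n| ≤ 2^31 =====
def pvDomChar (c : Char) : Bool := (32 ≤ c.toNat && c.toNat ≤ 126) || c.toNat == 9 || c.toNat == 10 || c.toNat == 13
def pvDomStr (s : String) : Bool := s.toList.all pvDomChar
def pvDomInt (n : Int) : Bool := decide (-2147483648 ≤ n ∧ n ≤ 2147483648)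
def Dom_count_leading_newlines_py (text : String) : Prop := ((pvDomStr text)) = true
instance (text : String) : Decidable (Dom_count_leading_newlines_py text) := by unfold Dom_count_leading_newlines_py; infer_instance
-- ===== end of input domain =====

-- B replaces A's accumulate-and-break loop with whole-string methods: delete '\r' via replace, then leading-newline run = len - len(lstrip('\n')); objective: alternative (return value only; neither mutates).


-- ===== PORT A =====
-- A's for-loop with break/continue: structural recursion carrying the counter
def cln_loopA : List Char → Int → Int
  | [], cnt => cnt
  | c :: rest, cnt =>
      if c == '\n' then cln_loopA rest (cnt + 1)
      else if c == '\r' then cln_loopA rest cnt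
      else cnt

def count_leading_newlines_py (text : String) : Int :=
  cln_loopA text.toList 0

-- ===== PORT B =====
-- text.replace("\r", "") → PySem.Str.replace; stripped.lstrip("\n") ported by hand as
-- dropWhile (· == '\n') — exact: Python's lstrip(chars) removes exactly the leading chars in the set {'\n'}
def count_leading_newlines_py_alt (text : String) : Int :=
  let stripped := (PySem.Str.replace text "\r" "").toList
  (stripped.length : Int) - ((stripped.dropWhile (· == '\n')).length : Int)

-- ===== PRECONDITION & SPEC =====
def Spec_count_leading_newlines_py (text : String) (out : Int) : Prop := out = count_leading_newlines_py_alt text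
instance (text : String) (out : Int) : Decidable (Spec_count_leading_newlines_py text out) := by unfold Spec_count_leading_newlines_py; infer_instance

-- ===== CLAIM =====
def Claim_equal_count_leading_newlines_py : Prop := ∀ (text : String), Dom_count_leading_newlines_py text → Spec_count_leading_newlines_py text (count_leading_newlines_py text)

-- ===== LEMMAS AND PROOFS =====
theorem replace_go_cr (l : List Char) : ∀ (fuel : Nat) (acc : List Char), l.length ≤ fuel →
    PySem.Chars.replace.go ['\r'] [] fuel l acc = acc.reverse ++ l.filter (fun c => !(c == '\r')) := by
  induction l with
  | nil =>
      intro fuel acc _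
      cases fuel <;> simp [PySem.Chars.replace.go]
  | cons c rest ih =>
      intro fuel acc hle
      cases fuel with
      | zero => simp at hle
      | succ n =>
          by_cases h : c = '\r'
          · subst h
            simp [PySem.Chars.replace.go, List.isPrefixOf, ih n acc (by simpa using hle)]
          · have hp : List.isPrefixOf ['\r'] (c :: rest) = false := by
              simp [List.isPrefixOf]; exact fun e => h e.symm
            simp [PySem.Chars.replace.go, hp, h, ih n (c :: acc) (by simpa using hle)]

theorem replace_cr_eq_filter (l : List Char) :
    PySem.Chars.replace l ['\r'] [] = l.filter (fun c => !(c == '\r')) := by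
  simpa [PySem.Chars.replace] using replace_go_cr l l.length [] le_rfl

theorem cln_loopA_eq (l : List Char) (cnt : Int) :
    cln_loopA l cnt =
      cnt + (((l.filter (fun c => !(c == '\r'))).length : Int)
        - (((l.filter (fun c => !(c == '\r'))).dropWhile (· == '\n')).length : Int)) := by
  induction l generalizing cnt with
  | nil => simp [cln_loopA]
  | cons c rest ih =>
      by_cases h : c = '\n'
      · subst h
        simp [cln_loopA, List.filter, ih]
        ring
      · by_cases h' : c = '\r'
        · subst h'
          simp [cln_loopA, List.filter, ih]
        · have hc : (!(c == '\r')) = true := by simp [h']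
          have hn : (c == '\n') = false := by simp [h]
          simp [cln_loopA, List.filter, hc, hn]
          exact fun e => absurd e h'

-- ===== VERDICT =====
theorem count_leading_newlines_py_spec : Claim_equal_count_leading_newlines_py := by
  intro text _
  unfold Spec_count_leading_newlines_py count_leading_newlines_py count_leading_newlines_py_alt
  simp [PySem.Str.replace, replace_cr_eq_filter, cln_loopA_eq]
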